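-- pv_equiv track=rewrite | github.com/rice-cs-edutools/testception | base_set_generation/exhaustive_generator.py | _create_str_perms
-- ===== SOURCE A (Python) =====
-- def _create_str_perms(max_length, min_length, domain):
--     """
--     Helper function for _process_str:
--
--     """
--     if max_length == 0:
--         ## Base case: the only zero-length option is the empty string
--         return {"":True}
--
--     else:
--         ## Recursive case: find all valid strings of length l such that
--         ## min_length <= l <= max_length
--         all_strs = {}
--
--         ## Find all valid strings of length l such that
--         ## min_length <= l <= max_length - 1
--         shorter_strs = _create_str_perms(max_length - 1, min_length, domain)
--
--         ## Exhaustively append one character (from domain) to each option, and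
--         ## then include both the pre- and post-extended versions of the strings
--         ## to all_strs
--         for astr in shorter_strs:
--             ## Add the string itself
--             if astr not in all_strs and len(astr) >= min_length:
--                 all_strs[astr] = True
--
--         for astr in shorter_strs:
--             ## Add all extensions to the string
--             for char in domain:
--                 if astr + char not in all_strs:
--                     all_strs[astr + char] = True
--
--         return all_strs
-- ===== SOURCE B (Python) =====
-- def _create_str_perms(max_length, min_length, domain):
--     """Enumerate all strings over `domain` with length in [min_length, max_length]
--     (length max_length is always included, matching the recursion's top level)."""
--     if max_length == 0:
--         return {"": True}
--     chars = list(dict.fromkeys(domain))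
--     result = {}
--     block = [""]  # all strings of length L, in product order
--     for L in range(max_length + 1):
--         if L > 0:
--             block = [s + c for s in block for c in chars]
--         if L >= min_length or L == max_length:
--             for s in block:
--                 result[s] = True
--     return result
-- ===== Notes on version B (the rewrite author's own statement) =====
-- stated objective: alternative
-- what changed: Replaces A's recursion (which rebuilds, re-filters and re-extends the whole set of shorter strings at every recursion level) with a single loop over lengths that builds each length-block once as a cartesian-product extension of the previous block and adds it to the result dict when the length qualifies.
import Mathlib
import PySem

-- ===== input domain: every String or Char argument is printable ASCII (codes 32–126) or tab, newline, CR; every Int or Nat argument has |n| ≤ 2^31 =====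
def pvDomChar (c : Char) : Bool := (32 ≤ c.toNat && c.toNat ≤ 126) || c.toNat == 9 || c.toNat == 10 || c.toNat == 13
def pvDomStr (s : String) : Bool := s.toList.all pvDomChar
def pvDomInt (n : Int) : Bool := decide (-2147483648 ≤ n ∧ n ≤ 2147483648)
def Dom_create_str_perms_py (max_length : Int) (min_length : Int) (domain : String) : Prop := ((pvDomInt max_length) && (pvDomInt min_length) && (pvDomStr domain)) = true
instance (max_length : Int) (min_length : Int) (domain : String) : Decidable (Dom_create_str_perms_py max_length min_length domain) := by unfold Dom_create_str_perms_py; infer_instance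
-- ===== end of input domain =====

-- B replaces A's recursion (carry all shorter strings, re-filter and re-extend them at
-- every level) by one pass that builds each length-block once as a cartesian-product
-- extension and adds it directly; equivalence of the returned dicts (as insertion-ordered
-- association lists) is proved for every max_length ≥ 0.

-- ===== PORT A =====
-- A's recursion on max_length; Python re-checks `max_length == 0` at every level, which the
-- Nat pattern match plays here (negative max_length raises RecursionError: outside Pre_).
def aGo (n : Nat) (min_length : Int) (domain : String) : PySem.Dict String Bool :=
  match n with
  | 0 => PySem.Dict.insert PySem.Dict.empty "" true
  | m + 1 =>
    let shorter := aGo m min_length domain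
    let all_strs :=
      shorter.keys.foldl (fun acc astr =>
        if PySem.Dict.contains acc astr = false ∧ min_length ≤ PySem.Str.len astr then
          PySem.Dict.insert acc astr true
        else acc) PySem.Dict.empty
    shorter.keys.foldl (fun acc astr =>
      domain.toList.foldl (fun acc ch =>
        if PySem.Dict.contains acc (astr ++ ch.toString) = false then
          PySem.Dict.insert acc (astr ++ ch.toString) true
        else acc) acc) all_strs

def create_str_perms_py (max_length : Int) (min_length : Int) (domain : String) : List (String × Bool) :=
  (aGo max_length.toNat min_length domain).items

-- ===== PORT B =====
def create_str_perms_py_alt (max_length : Int) (min_length : Int) (domain : String) : List (String × Bool) :=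
  if max_length == 0 then (PySem.Dict.insert PySem.Dict.empty "" true).items
  else
    let chars := PySem.List.dedup domain.toList
    let st := (PySem.List.pyRange 0 (max_length + 1) 1).foldl
      (fun (st : PySem.Dict String Bool × List String) L =>
        let block := if 0 < L then st.2.flatMap (fun s => chars.map (fun c => s ++ c.toString)) else st.2
        let result := if min_length ≤ L ∨ L == max_length then
            block.foldl (fun r s => r.insert s true) st.1
          else st.1
        (result, block))
      (PySem.Dict.empty, [""])
    st.1.items

-- ===== PRECONDITION & SPEC =====
-- Pre_ excludes exactly the inputs where the Python A raises (RecursionError on negative max_length).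
def Pre_create_str_perms_py (max_length : Int) (min_length : Int) (domain : String) : Prop :=
  0 ≤ max_length
instance (max_length : Int) (min_length : Int) (domain : String) : Decidable (Pre_create_str_perms_py max_length min_length domain) := by unfold Pre_create_str_perms_py; infer_instance

def pvWitness_create_str_perms_py : Int × Int × String := (2, 1, "ab")

def Spec_create_str_perms_py (max_length : Int) (min_length : Int) (domain : String) (out : List (String × Bool)) : Prop := out = create_str_perms_py_alt max_length min_length domain
instance (max_length : Int) (min_length : Int) (domain : String) (out : List (String × Bool)) : Decidable (Spec_create_str_perms_py max_length min_length domain out) := by unfold Spec_create_str_perms_py; infer_instance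

-- ===== CLAIM (what is proved, stated in full; the proofs are below) =====
def Claim_equal_create_str_perms_py : Prop := ∀ (max_length : Int) (min_length : Int) (domain : String), Dom_create_str_perms_py max_length min_length domain → Pre_create_str_perms_py max_length min_length domain → Spec_create_str_perms_py max_length min_length domain (create_str_perms_py max_length min_length domain)

-- ===== LEMMAS AND PROOFS =====

-- pairing a key with the stored value True
def pvPr (s : String) : String × Bool := (s, true)

-- `astr + char` on the character-list level
theorem toList_ext (s : String) (c : Char) : (s ++ c.toString).toList = s.toList ++ [c] := by
  simp [Char.toString_eq_singleton, String.append_singleton, String.toList_push]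

theorem len_ext (s : String) (c : Char) : (s ++ c.toString).toList.length = s.toList.length + 1 := by
  rw [toList_ext]; simp

theorem ext_inj {s t : String} {c d : Char}
    (hlen : s.toList.length = t.toList.length) (h : s ++ c.toString = t ++ d.toString) :
    s = t ∧ c = d := by
  have h' : s.toList ++ [c] = t.toList ++ [d] := by rw [← toList_ext, ← toList_ext, h]
  have := List.append_inj h' hlen
  exact ⟨String.toList_inj.mp this.1, by simpa using this.2⟩

theorem ext_inj_left {s : String} {c d : Char} (h : s ++ c.toString = s ++ d.toString) : c = d :=
  (ext_inj rfl h).2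

-- the characters of cs that are new relative to `seen`, first occurrences in order
def newOf : List Char → List Char → List Char
  | _, [] => []
  | seen, c :: cs => if c ∈ seen then newOf seen cs else c :: newOf (c :: seen) cs

theorem newOf_congr : ∀ (cs seen seen' : List Char), (∀ c, c ∈ seen ↔ c ∈ seen') →
    newOf seen cs = newOf seen' cs := by
  intro cs
  induction cs with
  | nil => intro _ _ _; rfl
  | cons c cs ih =>
    intro seen seen' h
    simp only [newOf]
    by_cases hc : c ∈ seen
    · rw [if_pos hc, if_pos ((h c).mp hc)]; exact ih _ _ h
    · rw [if_neg hc, if_neg (fun hx => hc ((h c).mpr hx))]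
      exact congrArg (c :: ·) (ih _ _ (by intro x; simp [h x]))

theorem foldl_add_eq_newOf : ∀ (cs : List Char) (s : PySem.Set Char), s.Nodup →
    cs.foldl PySem.Set.add s = s ++ newOf s cs := by
  intro cs
  induction cs with
  | nil => intro s _; simp [newOf]
  | cons c cs ih =>
    intro s hs
    simp only [List.foldl_cons, newOf]
    by_cases hc : c ∈ s
    · rw [PySem.Set.add_of_mem hc, if_pos hc, ih s hs]
    · rw [PySem.Set.add_of_not_mem hc, if_neg hc,
        ih (s ++ [c]) (by simp [List.nodup_append, hs]; exact fun a ha h => hc (h ▸ ha)),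
        newOf_congr cs (s ++ [c]) (c :: s) (by intro x; simp; tauto)]
      simp

theorem dedup_eq_newOf (cs : List Char) : PySem.List.dedup cs = newOf [] cs := by
  rw [PySem.List.dedup_eq_ofList, PySem.Set.ofList_eq_foldl,
    foldl_add_eq_newOf cs [] List.nodup_nil]
  rfl

-- all strings of length L over alphabet D, in product order
def blkP (D : List Char) : Nat → List String
  | 0 => [""]
  | L + 1 => (blkP D L).flatMap (fun s => D.map (fun c => s ++ c.toString))

theorem length_of_mem_blkP (D : List Char) : ∀ (L : Nat) (s : String), s ∈ blkP D L →
    s.toList.length = L := by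
  intro L
  induction L with
  | zero =>
    intro s hs
    have hs' : s ∈ ([""] : List String) := hs
    simp at hs'; subst hs'; rfl
  | succ L ih =>
    intro s hs
    simp only [blkP, List.mem_flatMap, List.mem_map] at hs
    obtain ⟨t, ht, c, _, rfl⟩ := hs
    rw [len_ext, ih t ht]

theorem nodup_ext_flatMap (D : List Char) (hD : D.Nodup) (nn : Nat) :
    ∀ (ss : List String), ss.Nodup → (∀ s ∈ ss, s.toList.length = nn) →
    (ss.flatMap (fun s => D.map (fun c => s ++ c.toString))).Nodup := by
  intro ss
  induction ss with
  | nil => intro _ _; simp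
  | cons s ss ih =>
    intro hnd hlen
    simp only [List.flatMap_cons, List.nodup_append]
    refine ⟨hD.map fun a b h => ext_inj_left h, ih hnd.of_cons (fun t ht => hlen t (by simp [ht])), ?_⟩
    intro x hx y hy
    simp only [List.mem_map] at hx
    simp only [List.mem_flatMap, List.mem_map] at hy
    obtain ⟨c, _, rfl⟩ := hx
    obtain ⟨t, ht, c', _, rfl⟩ := hy
    intro heq
    have hl : s.toList.length = t.toList.length := by
      rw [hlen t (by simp [ht]), hlen s (by simp)]
    exact ((List.nodup_cons.mp hnd).1) ((ext_inj hl heq).1 ▸ ht)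

theorem nodup_blkP (D : List Char) (hD : D.Nodup) : ∀ (L : Nat), (blkP D L).Nodup := by
  intro L
  induction L with
  | zero => simp [blkP]
  | succ L ih => exact nodup_ext_flatMap D hD L (blkP D L) ih (length_of_mem_blkP D L)

-- the strings of length < m that pass the min_length filter, grouped by length
def shortPartP (D : List Char) (mn : Int) (m : Nat) : List String :=
  (List.range m).flatMap (fun (L : Nat) => if mn ≤ (L : Int) then blkP D L else [])

theorem shortPartP_zero (D : List Char) (mn : Int) : shortPartP D mn 0 = [] := rfl

theorem shortPartP_succ (D : List Char) (mn : Int) (m : Nat) :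
    shortPartP D mn (m + 1) = shortPartP D mn m ++ (if mn ≤ (m : Int) then blkP D m else []) := by
  simp [shortPartP, List.range_succ]

theorem mem_shortPartP (D : List Char) (mn : Int) (m : Nat) (s : String) :
    s ∈ shortPartP D mn m ↔ ∃ L, L < m ∧ mn ≤ (L : Int) ∧ s ∈ blkP D L := by
  simp only [shortPartP, List.mem_flatMap, List.mem_range]
  constructor
  · rintro ⟨L, hL, hs⟩
    by_cases h : mn ≤ (L : Int)
    · exact ⟨L, hL, h, by simpa [h] using hs⟩
    · simp [h] at hs
  · rintro ⟨L, hL, h, hs⟩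
    exact ⟨L, hL, by simp [h, hs]⟩

theorem length_of_mem_shortPartP (D : List Char) (mn : Int) (m : Nat) (s : String)
    (hs : s ∈ shortPartP D mn m) : s.toList.length < m ∧ mn ≤ (s.toList.length : Int) := by
  obtain ⟨L, hL, h, hs⟩ := (mem_shortPartP D mn m s).mp hs
  rw [length_of_mem_blkP D L s hs]
  exact ⟨hL, h⟩

theorem nodup_shortPartP (D : List Char) (hD : D.Nodup) (mn : Int) : ∀ (m : Nat),
    (shortPartP D mn m).Nodup := by
  intro m
  induction m with
  | zero => simp [shortPartP_zero]
  | succ m ih =>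
    rw [shortPartP_succ]
    by_cases h : mn ≤ (m : Int)
    · rw [if_pos h, List.nodup_append]
      refine ⟨ih, nodup_blkP D hD m, ?_⟩
      intro s hs t ht heq
      have h1 := (length_of_mem_shortPartP D mn m s hs).1
      have h2 := length_of_mem_blkP D m t ht
      rw [heq] at h1; omega
    · rw [if_neg h]; simpa using ih

-- dict bookkeeping
theorem keys_of_items {d : PySem.Dict String Bool} {us : List String}
    (hd : d.items = us.map pvPr) : d.keys = us := by
  have hc : (fun (x : String × Bool) => x.1) ∘ pvPr = id := funext fun s => rfl
  simp [PySem.Dict.keys, hd, List.map_map, hc]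

theorem contains_iff_of_items {d : PySem.Dict String Bool} {us : List String}
    (hd : d.items = us.map pvPr) (s : String) : d.contains s = true ↔ s ∈ us := by
  rw [PySem.Dict.contains_iff_mem_keys, keys_of_items hd]

theorem contains_false_of_items {d : PySem.Dict String Bool} {us : List String}
    (hd : d.items = us.map pvPr) {s : String} (h : s ∉ us) : d.contains s = false := by
  cases hb : d.contains s
  · rfl
  · exact absurd ((contains_iff_of_items hd s).mp hb) h

theorem contains_true_of_items {d : PySem.Dict String Bool} {us : List String}
    (hd : d.items = us.map pvPr) {s : String} (h : s ∈ us) : d.contains s = true :=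
  (contains_iff_of_items hd s).mpr h

-- A's first loop: over a duplicate-free key list every `not in all_strs` test succeeds,
-- so it is the min_length filter
theorem pass1 (mn : Int) : ∀ (ss ts : List String) (d : PySem.Dict String Bool),
    ss.Nodup → (∀ s ∈ ss, s ∉ ts) → d.items = ts.map pvPr →
    (ss.foldl (fun acc astr =>
        if PySem.Dict.contains acc astr = false ∧ mn ≤ PySem.Str.len astr then
          PySem.Dict.insert acc astr true
        else acc) d).items
      = (ts ++ ss.filter (fun s => decide (mn ≤ PySem.Str.len s))).map pvPr := by
  intro ss
  induction ss with
  | nil => intro ts d _ _ hd; simpa using hd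
  | cons s ss ih =>
    intro ts d hnd hdisj hd
    simp only [List.foldl_cons]
    have hcf : d.contains s = false := contains_false_of_items hd (hdisj s (by simp))
    by_cases hmn : mn ≤ PySem.Str.len s
    · rw [if_pos ⟨hcf, hmn⟩]
      have hd' : (d.insert s true).items = (ts ++ [s]).map pvPr := by
        rw [PySem.Dict.items_insert_of_not_contains d true hcf, hd]; simp [pvPr]
      rw [ih (ts ++ [s]) _ hnd.of_cons (fun t ht => by
            simp only [List.mem_append, List.mem_singleton]
            rintro (h | rfl)
            · exact hdisj t (by simp [ht]) h
            · exact (List.nodup_cons.mp hnd).1 ht) hd']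
      rw [show List.filter (fun s => decide (mn ≤ PySem.Str.len s)) (s :: ss)
            = s :: List.filter (fun s => decide (mn ≤ PySem.Str.len s)) ss from by
          rw [List.filter_cons, decide_eq_true hmn]; rfl]
      simp only [List.append_assoc, List.singleton_append]
    · rw [if_neg (fun h => hmn h.2)]
      rw [ih ts d hnd.of_cons (fun t ht => hdisj t (by simp [ht])) hd]
      rw [show List.filter (fun s => decide (mn ≤ PySem.Str.len s)) (s :: ss)
            = List.filter (fun s => decide (mn ≤ PySem.Str.len s)) ss from by
          rw [List.filter_cons, decide_eq_false hmn]; rfl]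

-- A's inner extension loop when every extension of astr is already present: a no-op
theorem innerSkip (s : String) :
    ∀ (cs : List Char) (d : PySem.Dict String Bool) (us : List String),
    d.items = us.map pvPr → (∀ c ∈ cs, (s ++ c.toString) ∈ us) →
    (cs.foldl (fun acc ch =>
        if PySem.Dict.contains acc (s ++ ch.toString) = false then
          PySem.Dict.insert acc (s ++ ch.toString) true
        else acc) d) = d := by
  intro cs
  induction cs with
  | nil => intro d us _ _; rfl
  | cons c cs ih =>
    intro d us hd hall
    simp only [List.foldl_cons]
    have hct := contains_true_of_items hd (hall c (by simp))
    rw [if_neg (by rw [hct]; exact fun h => nomatch h)]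
    exact ih d us hd (fun c' hc' => hall c' (by simp [hc']))

-- A's inner extension loop on a fresh astr: appends one extension per distinct new character
theorem innerExt (s : String) : ∀ (cs : List Char) (d : PySem.Dict String Bool)
    (us : List String) (seen : List Char),
    (∀ c, (s ++ c.toString) ∈ us ↔ c ∈ seen) → d.items = us.map pvPr →
    (cs.foldl (fun acc ch =>
        if PySem.Dict.contains acc (s ++ ch.toString) = false then
          PySem.Dict.insert acc (s ++ ch.toString) true
        else acc) d).items
      = (us ++ (newOf seen cs).map (fun c => s ++ c.toString)).map pvPr := by
  intro cs
  induction cs with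
  | nil => intro d us seen _ hd; simpa [newOf] using hd
  | cons c cs ih =>
    intro d us seen hiff hd
    simp only [List.foldl_cons, newOf]
    by_cases hc : c ∈ seen
    · rw [if_pos hc]
      have hct := contains_true_of_items hd ((hiff c).mpr hc)
      rw [if_neg (by rw [hct]; exact fun h => nomatch h)]
      exact ih d us seen hiff hd
    · rw [if_neg hc]
      have hcf : d.contains (s ++ c.toString) = false :=
        contains_false_of_items hd (fun h => hc ((hiff c).mp h))
      rw [if_pos hcf]
      have hd' : (d.insert (s ++ c.toString) true).items
          = (us ++ [s ++ c.toString]).map pvPr := by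
        rw [PySem.Dict.items_insert_of_not_contains d true hcf, hd]; simp [pvPr]
      rw [ih _ (us ++ [s ++ c.toString]) (c :: seen) (fun c' => by
            simp only [List.mem_append, List.mem_cons]
            constructor
            · rintro (h | heq | hnil)
              · exact Or.inr ((hiff c').mp h)
              · exact Or.inl (ext_inj_left heq)
              · cases hnil
            · rintro (rfl | h)
              · exact Or.inr (Or.inl rfl)
              · exact Or.inl ((hiff c').mpr h)) hd']
      simp only [List.map_cons, List.append_assoc, List.singleton_append]

-- A's outer extension loop over the already-covered shorter strings: a no-op
theorem pass2_skip (domain : String) : ∀ (ss : List String) (d : PySem.Dict String Bool)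
    (us : List String),
    d.items = us.map pvPr → (∀ s ∈ ss, ∀ c ∈ domain.toList, (s ++ c.toString) ∈ us) →
    (ss.foldl (fun acc astr =>
      domain.toList.foldl (fun acc ch =>
        if PySem.Dict.contains acc (astr ++ ch.toString) = false then
          PySem.Dict.insert acc (astr ++ ch.toString) true
        else acc) acc) d) = d := by
  intro ss
  induction ss with
  | nil => intro d us _ _; rfl
  | cons s ss ih =>
    intro d us hd hall
    simp only [List.foldl_cons]
    rw [innerSkip s domain.toList d us hd (hall s (by simp))]
    exact ih d us hd (fun t ht c hc => hall t (by simp [ht]) c hc)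

-- A's outer extension loop over the top-length block: appends the next block in product order
theorem pass2_fresh (domain : String) (nn : Nat) : ∀ (ss : List String)
    (d : PySem.Dict String Bool) (us : List String),
    ss.Nodup → (∀ s ∈ ss, s.toList.length = nn) →
    (∀ s ∈ ss, ∀ c : Char, (s ++ c.toString) ∉ us) → d.items = us.map pvPr →
    (ss.foldl (fun acc astr =>
      domain.toList.foldl (fun acc ch =>
        if PySem.Dict.contains acc (astr ++ ch.toString) = false then
          PySem.Dict.insert acc (astr ++ ch.toString) true
        else acc) acc) d).items
      = (us ++ ss.flatMap (fun s => (newOf [] domain.toList).map (fun c => s ++ c.toString))).map pvPr := by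
  intro ss
  induction ss with
  | nil => intro d us _ _ _ hd; simpa using hd
  | cons s ss ih =>
    intro d us hnd hlen hfresh hd
    simp only [List.foldl_cons]
    have h1 := innerExt s domain.toList d us []
      (fun c => ⟨fun h => absurd h (hfresh s (by simp) c), fun h => (List.not_mem_nil h).elim⟩) hd
    rw [ih _ (us ++ (newOf [] domain.toList).map (fun c => s ++ c.toString)) hnd.of_cons
        (fun t ht => hlen t (by simp [ht]))
        (fun t ht c => by
          simp only [List.mem_append, List.mem_map]
          rintro (h | ⟨c', _, heq⟩)
          · exact hfresh t (by simp [ht]) c h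
          · have hl : s.toList.length = t.toList.length := by
              rw [hlen t (by simp [ht]), hlen s (by simp)]
            exact (List.nodup_cons.mp hnd).1 ((ext_inj hl heq).1 ▸ ht)) h1]
    simp only [List.flatMap_cons, List.append_assoc]

theorem strLen_eq (s : String) : PySem.Str.len s = (s.toList.length : Int) := by
  simp [PySem.Str.len_eq]

theorem A_main (mn : Int) (domain : String) : ∀ (n : Nat),
    (aGo n mn domain).items
      = (shortPartP (PySem.List.dedup domain.toList) mn n ++ blkP (PySem.List.dedup domain.toList) n).map pvPr := by
  have hD : (PySem.List.dedup domain.toList).Nodup := PySem.List.nodup_dedup _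
  set D := PySem.List.dedup domain.toList with hDdef
  intro n
  induction n with
  | zero =>
    show (PySem.Dict.insert PySem.Dict.empty "" true).items = _
    rw [PySem.Dict.items_insert_of_not_contains _ true rfl]
    rfl
  | succ m ih =>
    have hnodup : (shortPartP D mn m ++ blkP D m).Nodup := by
      rw [List.nodup_append]
      refine ⟨nodup_shortPartP D hD mn m, nodup_blkP D hD m, ?_⟩
      intro s hs t ht heq
      have h1 := (length_of_mem_shortPartP D mn m s hs).1
      have h2 := length_of_mem_blkP D m t ht
      rw [heq] at h1; omega
    have hkeys : (aGo m mn domain).keys = shortPartP D mn m ++ blkP D m := keys_of_items ih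
    have hfil : (shortPartP D mn m ++ blkP D m).filter (fun s => decide (mn ≤ PySem.Str.len s))
        = shortPartP D mn (m + 1) := by
      rw [List.filter_append, shortPartP_succ]
      congr 1
      · apply List.filter_eq_self.mpr
        intro s hs
        have h2 := (length_of_mem_shortPartP D mn m s hs).2
        simp only [strLen_eq, decide_eq_true_eq]
        exact h2
      · by_cases hm : mn ≤ (m : Int)
        · rw [if_pos hm]
          apply List.filter_eq_self.mpr
          intro s hs
          have h2 := length_of_mem_blkP D m s hs
          simp only [strLen_eq, h2, decide_eq_true_eq]
          exact hm
        · rw [if_neg hm]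
          apply List.filter_eq_nil_iff.mpr
          intro s hs
          have h2 := length_of_mem_blkP D m s hs
          simp only [strLen_eq, h2, decide_eq_true_eq]
          exact hm
    have h1 := pass1 mn (shortPartP D mn m ++ blkP D m) [] PySem.Dict.empty hnodup
      (by simp) rfl
    rw [hfil] at h1
    simp only [List.nil_append] at h1
    simp only [aGo]
    rw [hkeys, List.foldl_append]
    rw [pass2_skip domain (shortPartP D mn m) _ (shortPartP D mn (m + 1)) h1 ?cover]
    · rw [pass2_fresh domain m (blkP D m) _ (shortPartP D mn (m + 1)) (nodup_blkP D hD m)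
        (length_of_mem_blkP D m) ?fresh h1]
      · have hext : (blkP D m).flatMap
            (fun s => (newOf [] domain.toList).map (fun c => s ++ c.toString)) = blkP D (m + 1) := by
          rw [← dedup_eq_newOf]; rfl
        rw [hext]
      case fresh =>
        intro s hs c hmem
        have h1l := (length_of_mem_shortPartP D mn (m + 1) _ hmem).1
        have h2l := length_of_mem_blkP D m s hs
        rw [len_ext, h2l] at h1l
        omega
    case cover =>
      intro s hs c hc
      obtain ⟨L, hL, hmnL, hsL⟩ := (mem_shortPartP D mn m s).mp hs
      have hcD : c ∈ D := (PySem.List.mem_dedup _ c).mpr hc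
      have hmem : s ++ c.toString ∈ blkP D (L + 1) := by
        simp only [blkP, List.mem_flatMap]
        exact ⟨s, hsL, List.mem_map.mpr ⟨c, hcD, rfl⟩⟩
      exact (mem_shortPartP D mn (m + 1) _).mpr ⟨L + 1, by omega, by push_cast; omega, hmem⟩

-- B's loop body (the port's lambda, let-reduced), for stating the loop invariant
def bStep (mn M : Int) (domain : String) (st : PySem.Dict String Bool × List String) (L : Int) :
    PySem.Dict String Bool × List String :=
  let block := if 0 < L then
      st.2.flatMap (fun s => (PySem.List.dedup domain.toList).map (fun c => s ++ c.toString))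
    else st.2
  let result := if mn ≤ L ∨ L == M then block.foldl (fun r s => r.insert s true) st.1 else st.1
  (result, block)

theorem B_inv (mn : Int) (domain : String) (n : Nat) (M : Int) (hM : M = (n : Int)) (hn : 1 ≤ n) :
    ∀ (j : Nat), j < n →
    ((PySem.List.pyRange 0 ((j : Int) + 1) 1).foldl (bStep mn M domain)
        (PySem.Dict.empty, [""])).1.items
        = (shortPartP (PySem.List.dedup domain.toList) mn (j + 1)).map pvPr
      ∧ ((PySem.List.pyRange 0 ((j : Int) + 1) 1).foldl (bStep mn M domain)
        (PySem.Dict.empty, [""])).2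
        = blkP (PySem.List.dedup domain.toList) j := by
  have hD : (PySem.List.dedup domain.toList).Nodup := PySem.List.nodup_dedup _
  set D := PySem.List.dedup domain.toList with hDdef
  intro j
  induction j with
  | zero =>
    intro _
    rw [show ((0 : Nat) : Int) + 1 = 0 + 1 from by norm_num]
    rw [PySem.List.pyRange_one_singleton 0]
    simp only [List.foldl_cons, List.foldl_nil]
    have hbeq : ((0 : Int) == M) = false := by
      rw [beq_eq_false_iff_ne, hM]; omega
    simp only [bStep, hbeq]
    norm_num
    by_cases hm : mn ≤ (0 : Int)
    · rw [if_pos hm]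
      constructor
      · rw [PySem.Dict.items_insert_of_not_contains _ true rfl]
        rw [shortPartP_succ]
        simp only [Nat.cast_zero, if_pos hm, shortPartP_zero]
        rfl
      · rfl
    · rw [if_neg hm]
      constructor
      · rw [shortPartP_succ]
        simp only [Nat.cast_zero, if_neg hm, shortPartP_zero]
        rfl
      · rfl
  | succ j ihj =>
    intro hjn
    have ⟨ih1, ih2⟩ := ihj (by omega)
    have hcast : ((j + 1 : Nat) : Int) + 1 = (((j : Nat) : Int) + 1) + 1 := by push_cast; ring
    rw [hcast, PySem.List.pyRange_one_succ_right (show (0:Int) ≤ (j : Int) + 1 by omega), List.foldl_append]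
    simp only [List.foldl_cons, List.foldl_nil]
    simp only [bStep, ih2]
    have hlt : (0 : Int) < (j : Int) + 1 := by omega
    rw [if_pos hlt]
    have hblk : (blkP D j).flatMap (fun s => D.map (fun c => s ++ c.toString)) = blkP D (j + 1) := rfl
    rw [hblk]
    have hbeq : (((j : Int) + 1) == M) = false := by
      rw [beq_eq_false_iff_ne, hM]
      intro h; omega
    have hfresh : ∀ s ∈ blkP D (j + 1),
        ((PySem.List.pyRange 0 ((j : Int) + 1) 1).foldl (bStep mn M domain)
          (PySem.Dict.empty, [""])).1.contains s = false := by
      intro s hs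
      apply contains_false_of_items ih1
      intro hmem
      have h1l := (length_of_mem_shortPartP D mn (j + 1) s hmem).1
      have h2l := length_of_mem_blkP D (j + 1) s hs
      omega
    by_cases hm : mn ≤ (j : Int) + 1
    · rw [if_pos (Or.inl hm)]
      refine ⟨?_, rfl⟩
      rw [PySem.Dict.items_foldl_insert_fresh (blkP D (j + 1)) (fun s => s) (fun _ => true) _
        hfresh (by simpa using nodup_blkP D hD (j + 1))]
      have hm' : mn ≤ ((j + 1 : Nat) : Int) := by push_cast; omega
      rw [ih1, shortPartP_succ D mn (j + 1), if_pos hm', List.map_append]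
      rfl
    · have hcond : ¬ (mn ≤ (j : Int) + 1 ∨ ((j : Int) + 1 == M) = true) := by
        rintro (h | h)
        · exact hm h
        · rw [hbeq] at h; exact nomatch h
      rw [if_neg hcond]
      refine ⟨?_, rfl⟩
      have hm'' : ¬ mn ≤ ((j + 1 : Nat) : Int) := by push_cast; omega
      rw [ih1, shortPartP_succ (D := D) mn (j + 1), if_neg hm'']
      simp

theorem B_main (mn : Int) (domain : String) (k : Nat) :
    create_str_perms_py_alt ((k + 1 : Nat) : Int) mn domain
      = (shortPartP (PySem.List.dedup domain.toList) mn (k + 1)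
          ++ blkP (PySem.List.dedup domain.toList) (k + 1)).map pvPr := by
  have hD : (PySem.List.dedup domain.toList).Nodup := PySem.List.nodup_dedup _
  set D := PySem.List.dedup domain.toList with hDdef
  have halt : create_str_perms_py_alt ((k + 1 : Nat) : Int) mn domain
      = ((PySem.List.pyRange 0 (((k + 1 : Nat) : Int) + 1) 1).foldl
          (bStep mn ((k + 1 : Nat) : Int) domain) (PySem.Dict.empty, [""])).1.items := rfl
  rw [halt]
  have hcast : ((k + 1 : Nat) : Int) + 1 = (((k : Nat) : Int) + 1) + 1 := by push_cast; ring
  rw [hcast, PySem.List.pyRange_one_succ_right (show (0:Int) ≤ (k : Int) + 1 by omega), List.foldl_append]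
  have ⟨ih1, ih2⟩ := B_inv mn domain (k + 1) ((k + 1 : Nat) : Int) rfl (by omega) k (by omega)
  simp only [List.foldl_cons, List.foldl_nil]
  simp only [bStep, ih2]
  have hlt : (0 : Int) < (k : Int) + 1 := by omega
  rw [if_pos hlt]
  have hblk : (blkP D k).flatMap (fun s => D.map (fun c => s ++ c.toString)) = blkP D (k + 1) := rfl
  rw [hblk]
  have hbeq : (((k : Int) + 1) == ((k + 1 : Nat) : Int)) = true := by
    rw [beq_iff_eq]; push_cast; ring
  rw [if_pos (Or.inr hbeq)]
  have hfresh : ∀ s ∈ blkP D (k + 1),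
      ((PySem.List.pyRange 0 ((k : Int) + 1) 1).foldl (bStep mn ((k + 1 : Nat) : Int) domain)
        (PySem.Dict.empty, [""])).1.contains s = false := by
    intro s hs
    apply contains_false_of_items ih1
    intro hmem
    have h1l := (length_of_mem_shortPartP D mn (k + 1) s hmem).1
    have h2l := length_of_mem_blkP D (k + 1) s hs
    omega
  rw [PySem.Dict.items_foldl_insert_fresh (blkP D (k + 1)) (fun s => s) (fun _ => true) _
    hfresh (by simpa using nodup_blkP D hD (k + 1))]
  rw [ih1, List.map_append]
  rfl

-- ===== VERDICT (by name: the statement is the Claim_ definition above) =====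
theorem create_str_perms_py_spec : Claim_equal_create_str_perms_py := by
  intro max_length min_length domain _ hpre
  unfold Spec_create_str_perms_py
  obtain ⟨n, rfl⟩ : ∃ n : Nat, max_length = (n : Int) :=
    ⟨max_length.toNat, (Int.toNat_of_nonneg hpre).symm⟩
  cases n with
  | zero => rfl
  | succ k =>
    rw [B_main min_length domain k]
    unfold create_str_perms_py
    rw [Int.toNat_natCast]
    exact A_main min_length domain (k + 1)
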